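-- pv_equiv track=rewrite | github.com/mriedman/pyprojects | python/cws/cw.py | tostrs
-- ===== SOURCE A (Python) =====
-- def tostrs(x):
--     y1=[]
--     y=''
--     for i in x+[' ']:
--         if i==' ':
--             if y!='':
--                 y1.append(y)
--                 y=''
--         else:
--             y+=i
--     return y1
-- ===== SOURCE B (Python) =====
-- def tostrs(x):
--     out = []
--     i = 0
--     n = len(x)
--     while i < n:
--         k = (x[i] == ' ')
--         j = i
--         while j < n and (x[j] == ' ') == k:
--             j += 1
--         if not k:
--             t = ''.join(x[i:j])
--             if t != '':
--                 out.append(t)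
--         i = j
--     return out
-- ===== Notes on version B (the rewrite author's own statement) =====
-- stated objective: alternative
-- what changed: B scans the list as maximal runs of space/non-space elements (a groupby-style two-level while loop joining each non-space run), instead of A's single element-by-element loop with a string accumulator and a trailing-space sentinel.
import Mathlib
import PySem

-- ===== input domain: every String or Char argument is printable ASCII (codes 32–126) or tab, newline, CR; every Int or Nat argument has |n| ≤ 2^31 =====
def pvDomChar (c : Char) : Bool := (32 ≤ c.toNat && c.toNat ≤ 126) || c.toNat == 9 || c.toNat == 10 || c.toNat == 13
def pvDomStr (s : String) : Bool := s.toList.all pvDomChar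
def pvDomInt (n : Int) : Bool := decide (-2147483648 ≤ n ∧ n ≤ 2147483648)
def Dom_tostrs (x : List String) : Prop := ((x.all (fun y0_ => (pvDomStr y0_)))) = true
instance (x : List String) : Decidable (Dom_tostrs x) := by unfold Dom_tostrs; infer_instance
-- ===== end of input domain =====

-- B re-does the job as a run-based (groupby-style) scan instead of A's accumulator loop
-- with a trailing-space sentinel; same cost, different decomposition ("alternative").

-- ===== PORT A =====
-- A's loop body: flush the pending string y on a space element, otherwise extend y.
def tostrsStep (s : List String × String) (i : String) : List String × String :=
  if i = " " then (if s.2 ≠ "" then (s.1 ++ [s.2], "") else s) else (s.1, s.2 ++ i)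

-- A: fold over x + [' '] carrying (y1, y).
def tostrs (x : List String) : List String :=
  ((x ++ [" "]).foldl tostrsStep ([], "")).1

-- ===== PORT B =====
-- ''.join of a list of strings
def joinStrs : List String → String
  | [] => ""
  | a :: t => a ++ joinStrs t

-- B's outer while loop: consume one maximal run (the inner while = takeWhile/dropWhile
-- on the predicate (elem == ' ') == k), append the joined run if non-space and non-empty.
def tostrsGo : List String → List String → List String
  | [], out => out
  | a :: as, out =>
    if a == " " then
      tostrsGo (as.dropWhile (fun b => (b == " ") == (a == " "))) out
    else
      tostrsGo (as.dropWhile (fun b => (b == " ") == (a == " ")))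
        (if joinStrs (a :: as.takeWhile (fun b => (b == " ") == (a == " "))) ≠ "" then
          out ++ [joinStrs (a :: as.takeWhile (fun b => (b == " ") == (a == " ")))]
        else out)
termination_by l _ => l.length
decreasing_by
  all_goals
    simp only [List.length_cons]
    exact Nat.lt_succ_of_le (List.length_dropWhile_le _ _)

def tostrs_alt (x : List String) : List String := tostrsGo x []

-- ===== PRECONDITION & SPEC =====
def Spec_tostrs (x : List String) (out : List String) : Prop := out = tostrs_alt x
instance (x : List String) (out : List String) : Decidable (Spec_tostrs x out) := by unfold Spec_tostrs; infer_instance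

-- ===== CLAIM (what is proved, stated in full; the proofs are below) =====
def Claim_equal_tostrs : Prop := ∀ (x : List String), Dom_tostrs x → Spec_tostrs x (tostrs x)

-- ===== LEMMAS AND PROOFS =====

-- common reference function: tokens of l given pending accumulator y
def pvAux : List String → String → List String
  | [], y => if y = "" then [] else [y]
  | i :: t, y =>
    if i = " " then (if y = "" then pvAux t "" else y :: pvAux t "")
    else pvAux t (y ++ i)

theorem tostrs_foldl_eq (l : List String) :
    ∀ (acc : List String) (y : String),
    ((l ++ [" "]).foldl tostrsStep (acc, y)).1 = acc ++ pvAux l y := by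
  induction l with
  | nil =>
    intro acc y
    by_cases h : y = "" <;> simp [pvAux, tostrsStep, h]
  | cons i t ih =>
    intro acc y
    rw [List.cons_append, List.foldl_cons]
    by_cases hi : i = " "
    · by_cases hy : y = ""
      · have h1 : tostrsStep (acc, y) i = (acc, y) := by simp [tostrsStep, hi, hy]
        rw [h1, hy, ih]
        simp [pvAux, hi]
      · have h1 : tostrsStep (acc, y) i = (acc ++ [y], "") := by simp [tostrsStep, hi, hy]
        rw [h1, ih]
        simp [pvAux, hi, hy]
    · have h1 : tostrsStep (acc, y) i = (acc, y ++ i) := by simp [tostrsStep, hi]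
      rw [h1, ih]
      simp [pvAux, hi]

theorem pvAux_space (g : List String) (t : List String)
    (h : ∀ a ∈ g, a = " ") : pvAux (g ++ t) "" = pvAux t "" := by
  induction g with
  | nil => rfl
  | cons a as ih =>
    have ha : a = " " := h a (by simp)
    simp only [List.cons_append, pvAux, if_pos ha]
    exact ih (fun b hb => h b (by simp [hb]))

theorem pvAux_nonspace (g : List String) (t : List String)
    (h : ∀ a ∈ g, a ≠ " ") : ∀ y, pvAux (g ++ t) y = pvAux t (y ++ joinStrs g) := by
  induction g with
  | nil => intro y; simp [joinStrs]
  | cons a as ih =>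
    intro y
    have ha : a ≠ " " := h a (by simp)
    simp only [List.cons_append, pvAux, if_neg ha, joinStrs]
    rw [ih (fun b hb => h b (by simp [hb])), String.append_assoc]

theorem pvAux_flush (t : List String) (y : String)
    (h : t = [] ∨ ∃ t', t = " " :: t') :
    pvAux t y = (if y = "" then [] else [y]) ++ pvAux t "" := by
  rcases h with h | ⟨t', h⟩
  · subst h; by_cases hy : y = "" <;> simp [pvAux, hy]
  · subst h
    by_cases hy : y = "" <;> simp [pvAux, hy]

theorem dropWhile_shape {α : Type} (p : α → Bool) (l : List α) :
    l.dropWhile p = [] ∨ ∃ h t, l.dropWhile p = h :: t ∧ p h = false := by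
  induction l with
  | nil => exact Or.inl rfl
  | cons a as ih =>
    by_cases hp : p a = true
    · simpa [List.dropWhile, hp] using ih
    · exact Or.inr ⟨a, as, by simp [List.dropWhile, hp], by simpa using hp⟩

theorem tostrsGo_eq : ∀ (n : ℕ) (l : List String), l.length ≤ n →
    ∀ (out : List String), tostrsGo l out = out ++ pvAux l "" := by
  intro n
  induction n with
  | zero =>
    intro l hl out
    have : l = [] := List.length_eq_zero_iff.mp (Nat.le_zero.mp hl)
    subst this; simp [tostrsGo, pvAux]
  | succ n ih =>
    intro l hl out
    match l with
    | [] => simp [tostrsGo, pvAux]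
    | a :: as =>
      have hsplit := List.takeWhile_append_dropWhile (p := fun b => (b == " ") == (a == " ")) (l := as)
      have hrest_le : (as.dropWhile (fun b => (b == " ") == (a == " "))).length ≤ n := by
        have h1 := List.length_dropWhile_le (fun b => (b == " ") == (a == " ")) as
        have h2 : as.length + 1 ≤ n + 1 := by simpa using hl
        omega
      have hdecomp : pvAux (a :: as) "" =
          pvAux ((a :: as.takeWhile (fun b => (b == " ") == (a == " "))) ++
            as.dropWhile (fun b => (b == " ") == (a == " "))) "" := by
        rw [List.cons_append, hsplit]
      by_cases hk : a = " "
      · -- space run: skipped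
        have hg : ∀ b ∈ a :: as.takeWhile (fun b => (b == " ") == (a == " ")), b = " " := by
          intro b hb
          rcases List.mem_cons.mp hb with h | h
          · exact h ▸ hk
          · have hp := List.mem_takeWhile_imp h
            simp [hk] at hp
            exact hp
        rw [tostrsGo, if_pos (by simpa using hk), ih _ hrest_le, hdecomp,
          pvAux_space _ _ hg]
      · -- non-space run
        have hka : (a == " ") = false := by simpa using hk
        have hg : ∀ b ∈ a :: as.takeWhile (fun b => (b == " ") == (a == " ")), b ≠ " " := by
          intro b hb
          rcases List.mem_cons.mp hb with h | h
          · exact h ▸ hk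
          · have hp := List.mem_takeWhile_imp h
            simp [hka] at hp
            simpa using hp
        have hshape : as.dropWhile (fun b => (b == " ") == (a == " ")) = [] ∨
            ∃ t', as.dropWhile (fun b => (b == " ") == (a == " ")) = " " :: t' := by
          rcases dropWhile_shape (fun b => (b == " ") == (a == " ")) as with h | ⟨h0, t0, heq, hph⟩
          · exact Or.inl h
          · refine Or.inr ⟨t0, ?_⟩
            have h0eq : h0 = " " := by
              simp [hka] at hph
              simpa using hph
            rw [heq, h0eq]
        have hA : pvAux (a :: as) "" =
            (if joinStrs (a :: as.takeWhile (fun b => (b == " ") == (a == " "))) = "" then []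
             else [joinStrs (a :: as.takeWhile (fun b => (b == " ") == (a == " ")))]) ++
            pvAux (as.dropWhile (fun b => (b == " ") == (a == " "))) "" := by
          rw [hdecomp, pvAux_nonspace _ _ hg, String.empty_append]
          exact pvAux_flush _ _ hshape
        rw [tostrsGo, if_neg (by simp [hka]), ih _ hrest_le, hA]
        by_cases ht : joinStrs (a :: as.takeWhile (fun b => (b == " ") == (a == " "))) = ""
        · simp [ht]
        · simp [ht, List.append_assoc]

-- ===== VERDICT (by name: the statement is the Claim_ definition above) =====
theorem tostrs_spec : Claim_equal_tostrs := by
  intro x _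
  unfold Spec_tostrs tostrs tostrs_alt
  rw [tostrs_foldl_eq, tostrsGo_eq x.length x (le_refl _) []]
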